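-- pv_equiv track=rewrite | github.com/Ckaf/svapy | ref_model/ref_multiplier.py | reference_multiplier
-- ===== SOURCE A (Python) =====
-- def reference_multiplier(clk_seq, rst_n_seq, valid_in_seq, data_in_seq):
--     """
--     Reference model for the pipelined multiplier with saturation.
--
--     Args:
--         clk_seq (list): Sequence of clock values (0/1)
--         rst_n_seq (list): Sequence of reset values (0/1)
--         valid_in_seq (list): Sequence of valid input signals
--         data_in_seq (list): Sequence of input data values (0-255)
--
--     Returns:
--         tuple: (valid_out_seq, data_out_seq)
--     """
--     # Initialize registers
--     valid_reg = 0
--     data_reg = 0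
--     # Store previous inputs for pipeline behavior
--     prev_valid_in = 0
--     prev_data_in = 0
--
--     valid_out_seq = []
--     data_out_seq = []
--     prev_clk = 0  # Previous clock state for edge detection
--
--     for i in range(len(clk_seq)):
--         clk = clk_seq[i]
--         rst_n = rst_n_seq[i]
--         valid_in = valid_in_seq[i]
--         data_in = data_in_seq[i]
--
--         # Calculate next values based on previous inputs
--         if prev_valid_in:
--             if prev_data_in < 128:
--                 next_data_val = prev_data_in * 2
--             else:
--                 next_data_val = 255  # Saturation
--         else:
--             next_data_val = 0
--
--         next_valid_val = prev_valid_in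
--
--         # Reset handling (asynchronous)
--         if not rst_n:
--             valid_reg = 0
--             data_reg = 0
--         # Clock edge detection (posedge)
--         elif prev_clk == 0 and clk == 1:
--             valid_reg = next_valid_val
--             data_reg = next_data_val
--
--         # Store current register values
--         valid_out_seq.append(valid_reg)
--         data_out_seq.append(data_reg)
--
--         # Update previous values for next cycle
--         prev_valid_in = valid_in
--         prev_data_in = data_in
--         prev_clk = clk
--
--     return valid_out_seq, data_out_seq
-- ===== SOURCE B (Python) =====
-- def reference_multiplier(clk_seq, rst_n_seq, valid_in_seq, data_in_seq):
--     """Event-driven rewrite: instead of simulating the latch cycle by cycle,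
--     collect the register-change events (async reset, or posedge load of the
--     saturated-double of the previous cycle's inputs), then emit the outputs
--     as constant runs between consecutive events."""
--     n = len(clk_seq)
--     events = []
--     for i in range(n):
--         rst_n = rst_n_seq[i]
--         if not rst_n:
--             events.append((i, 0, 0))
--         elif clk_seq[i] == 1 and (i == 0 or clk_seq[i - 1] == 0):
--             v = valid_in_seq[i - 1] if i > 0 else 0
--             d0 = data_in_seq[i - 1] if i > 0 else 0
--             d = (d0 * 2 if d0 < 128 else 255) if v else 0
--             events.append((i, v, d))
--     valid_out = []
--     data_out = []
--     pos = 0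
--     v_cur = d_cur = 0
--     for i, v, d in events:
--         valid_out += [v_cur] * (i - pos)
--         data_out += [d_cur] * (i - pos)
--         v_cur, d_cur, pos = v, d, i
--     valid_out += [v_cur] * (n - pos)
--     data_out += [d_cur] * (n - pos)
--     return valid_out, data_out
-- ===== Notes on version B (the rewrite author's own statement) =====
-- stated objective: alternative
-- what changed: B replaces A's cycle-by-cycle register latch (carrying valid_reg/data_reg and prev_* through one loop) with an event-driven algorithm: it first extracts the list of register-change events (async resets and posedge loads, reading the shifted inputs directly by index), then reconstructs the outputs as constant runs between consecutive events.
import Mathlib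
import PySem

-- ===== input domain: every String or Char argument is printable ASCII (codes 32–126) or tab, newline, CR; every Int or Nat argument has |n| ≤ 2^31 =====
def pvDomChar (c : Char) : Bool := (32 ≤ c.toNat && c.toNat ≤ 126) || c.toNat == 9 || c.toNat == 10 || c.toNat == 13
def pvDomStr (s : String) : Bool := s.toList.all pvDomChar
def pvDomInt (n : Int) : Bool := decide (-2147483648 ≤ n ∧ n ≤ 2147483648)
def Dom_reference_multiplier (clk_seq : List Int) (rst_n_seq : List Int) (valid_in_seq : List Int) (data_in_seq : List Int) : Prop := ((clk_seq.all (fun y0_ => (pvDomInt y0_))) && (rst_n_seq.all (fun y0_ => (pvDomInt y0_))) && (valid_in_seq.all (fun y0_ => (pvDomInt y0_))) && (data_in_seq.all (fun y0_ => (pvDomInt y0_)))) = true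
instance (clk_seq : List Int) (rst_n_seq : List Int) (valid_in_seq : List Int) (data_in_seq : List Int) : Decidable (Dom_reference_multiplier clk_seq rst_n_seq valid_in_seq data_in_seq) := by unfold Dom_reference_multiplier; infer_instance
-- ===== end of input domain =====

-- B replaces A's cycle-by-cycle register latch with an event-driven algorithm
-- (extract register-change events, then emit constant runs between them);
-- same return value wherever A returns (Pre_ excludes A's IndexError inputs).

-- ===== PORT A =====
-- A's loop `for i in range(len(clk_seq))`, one recursive step per iteration
def pvALoop (clk rst vin din : List Int) :
    Nat → Nat → Int → Int → Int → Int → Int → List Int → List Int → List Int × List Int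
  | 0, _, _, _, _, _, _, vout, dout => (vout, dout)
  | fuel+1, i, vr, dr, pv, pd, pc, vout, dout =>
      let c := PySem.List.pyGetD clk (i : Int) 0
      let rn := PySem.List.pyGetD rst (i : Int) 0
      let vi := PySem.List.pyGetD vin (i : Int) 0
      let di := PySem.List.pyGetD din (i : Int) 0
      let nd : Int := if pv ≠ 0 then (if pd < 128 then pd * 2 else 255) else 0
      let s : Int × Int :=
        if rn = 0 then (0, 0)
        else if pc = 0 ∧ c = 1 then (pv, nd)
        else (vr, dr)
      pvALoop clk rst vin din fuel (i+1) s.1 s.2 vi di c (vout ++ [s.1]) (dout ++ [s.2])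

def reference_multiplier (clk_seq : List Int) (rst_n_seq : List Int) (valid_in_seq : List Int) (data_in_seq : List Int) : List Int × List Int :=
  pvALoop clk_seq rst_n_seq valid_in_seq data_in_seq clk_seq.length 0 0 0 0 0 0 [] []

-- ===== PORT B =====
-- Source B's first loop: collect the register-change events (index, valid, data)
def pvEvents (clk rst vin din : List Int) : Nat → Nat → List (Nat × Int × Int)
  | 0, _ => []
  | fuel+1, i =>
      let rn := PySem.List.pyGetD rst (i : Int) 0
      if rn = 0 then (i, 0, 0) :: pvEvents clk rst vin din fuel (i+1)
      else if PySem.List.pyGetD clk (i : Int) 0 = 1 ∧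
              (i = 0 ∨ PySem.List.pyGetD clk ((i : Int) - 1) 0 = 0) then
        let v := if 0 < i then PySem.List.pyGetD vin ((i : Int) - 1) 0 else 0
        let d0 := if 0 < i then PySem.List.pyGetD din ((i : Int) - 1) 0 else 0
        let d := if v ≠ 0 then (if d0 < 128 then d0 * 2 else 255) else 0
        (i, v, d) :: pvEvents clk rst vin din fuel (i+1)
      else pvEvents clk rst vin din fuel (i+1)

-- Source B's second loop: one fold step per event, appending a constant run
def pvFill (s : (Nat × Int × Int) × (List Int × List Int)) (e : Nat × Int × Int) :
    (Nat × Int × Int) × (List Int × List Int) :=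
  ((e.1, e.2.1, e.2.2),
   (s.2.1 ++ List.replicate (e.1 - s.1.1) s.1.2.1,
    s.2.2 ++ List.replicate (e.1 - s.1.1) s.1.2.2))

-- Source B's trailing two appends: flush the last run up to n
def pvEmit (n : Nat) (r : (Nat × Int × Int) × (List Int × List Int)) : List Int × List Int :=
  (r.2.1 ++ List.replicate (n - r.1.1) r.1.2.1,
   r.2.2 ++ List.replicate (n - r.1.1) r.1.2.2)

def reference_multiplier_alt (clk_seq : List Int) (rst_n_seq : List Int) (valid_in_seq : List Int) (data_in_seq : List Int) : List Int × List Int :=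
  let n := clk_seq.length
  let evs := pvEvents clk_seq rst_n_seq valid_in_seq data_in_seq n 0
  pvEmit n (evs.foldl pvFill ((0, 0, 0), ([], [])))

-- ===== PRECONDITION & SPEC =====
-- Pre_ excludes exactly the inputs where A raises IndexError: A's loop indexes all
-- four lists at every i < len(clk_seq), so the other three must be at least as long.
def Pre_reference_multiplier (clk_seq : List Int) (rst_n_seq : List Int) (valid_in_seq : List Int) (data_in_seq : List Int) : Prop :=
  clk_seq.length ≤ rst_n_seq.length ∧ clk_seq.length ≤ valid_in_seq.length ∧ clk_seq.length ≤ data_in_seq.length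
instance (clk_seq : List Int) (rst_n_seq : List Int) (valid_in_seq : List Int) (data_in_seq : List Int) : Decidable (Pre_reference_multiplier clk_seq rst_n_seq valid_in_seq data_in_seq) := by unfold Pre_reference_multiplier; infer_instance

def pvWitness_reference_multiplier : List Int × List Int × List Int × List Int :=
  ([0, 1, 0, 1, 0, 1], [1, 1, 1, 1, 1, 1], [1, 1, 1, 0, 0, 0], [5, 130, 7, 0, 0, 0])

def Spec_reference_multiplier (clk_seq : List Int) (rst_n_seq : List Int) (valid_in_seq : List Int) (data_in_seq : List Int) (out : List Int × List Int) : Prop := out = reference_multiplier_alt clk_seq rst_n_seq valid_in_seq data_in_seq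
instance (clk_seq : List Int) (rst_n_seq : List Int) (valid_in_seq : List Int) (data_in_seq : List Int) (out : List Int × List Int) : Decidable (Spec_reference_multiplier clk_seq rst_n_seq valid_in_seq data_in_seq out) := by unfold Spec_reference_multiplier; infer_instance

-- ===== CLAIM (what is proved, stated in full; the proofs are below) =====
def Claim_equal_reference_multiplier : Prop := ∀ (clk_seq : List Int) (rst_n_seq : List Int) (valid_in_seq : List Int) (data_in_seq : List Int), Dom_reference_multiplier clk_seq rst_n_seq valid_in_seq data_in_seq → Pre_reference_multiplier clk_seq rst_n_seq valid_in_seq data_in_seq → Spec_reference_multiplier clk_seq rst_n_seq valid_in_seq data_in_seq (reference_multiplier clk_seq rst_n_seq valid_in_seq data_in_seq)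

-- ===== LEMMAS AND PROOFS =====

-- the one-cycle-delayed inputs A carries in prev_valid_in / prev_data_in / prev_clk
def pvPrev (l : List Int) (i : Nat) : Int :=
  if i = 0 then 0 else PySem.List.pyGetD l ((i : Int) - 1) 0

-- common reference: the register trace, one entry per cycle
def pvRun (clk rst vin din : List Int) : Nat → Nat → Int × Int → List (Int × Int)
  | 0, _, _ => []
  | fuel+1, i, r =>
      let r' : Int × Int :=
        if PySem.List.pyGetD rst (i : Int) 0 = 0 then (0, 0)
        else if PySem.List.pyGetD clk (i : Int) 0 = 1 ∧
                (i = 0 ∨ PySem.List.pyGetD clk ((i : Int) - 1) 0 = 0) then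
          (pvPrev vin i,
           if pvPrev vin i ≠ 0 then (if pvPrev din i < 128 then pvPrev din i * 2 else 255) else 0)
        else r
      r' :: pvRun clk rst vin din fuel (i+1) r'

theorem pvPrev_succ (l : List Int) (i : Nat) :
    pvPrev l (i+1) = PySem.List.pyGetD l (i : Int) 0 := by
  unfold pvPrev
  rw [show ((i+1 : Nat) : Int) - 1 = (i : Int) from by push_cast; ring]
  simp

theorem pvALoop_eq_run (clk rst vin din : List Int) :
    ∀ (fuel i : Nat) (vr dr : Int) (vout dout : List Int),
      pvALoop clk rst vin din fuel i vr dr (pvPrev vin i) (pvPrev din i) (pvPrev clk i) vout dout =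
        (vout ++ (pvRun clk rst vin din fuel i (vr, dr)).map Prod.fst,
         dout ++ (pvRun clk rst vin din fuel i (vr, dr)).map Prod.snd) := by
  intro fuel
  induction fuel with
  | zero => intro i vr dr vout dout; simp [pvALoop, pvRun]
  | succ f ih =>
    intro i vr dr vout dout
    simp only [pvALoop, pvRun]
    have hedge : (pvPrev clk i = 0 ∧ PySem.List.pyGetD clk (i : Int) 0 = 1) ↔
        (PySem.List.pyGetD clk (i : Int) 0 = 1 ∧
          (i = 0 ∨ PySem.List.pyGetD clk ((i : Int) - 1) 0 = 0)) := by
      unfold pvPrev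
      by_cases h0 : i = 0
      · simp [h0]
      · simp [h0]; tauto
    by_cases hr : PySem.List.pyGetD rst (i : Int) 0 = 0
    · simp only [if_pos hr]
      rw [show PySem.List.pyGetD vin (i : Int) 0 = pvPrev vin (i+1) from (pvPrev_succ vin i).symm,
          show PySem.List.pyGetD din (i : Int) 0 = pvPrev din (i+1) from (pvPrev_succ din i).symm,
          show PySem.List.pyGetD clk (i : Int) 0 = pvPrev clk (i+1) from (pvPrev_succ clk i).symm,
          ih (i+1)]
      simp
    · simp only [if_neg hr]
      by_cases he : pvPrev clk i = 0 ∧ PySem.List.pyGetD clk (i : Int) 0 = 1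
      · have he' := hedge.mp he
        simp only [if_pos he, if_pos he']
        rw [show PySem.List.pyGetD vin (i : Int) 0 = pvPrev vin (i+1) from (pvPrev_succ vin i).symm,
            show PySem.List.pyGetD din (i : Int) 0 = pvPrev din (i+1) from (pvPrev_succ din i).symm,
            show PySem.List.pyGetD clk (i : Int) 0 = pvPrev clk (i+1) from (pvPrev_succ clk i).symm,
            ih (i+1)]
        simp
      · have he' : ¬ (PySem.List.pyGetD clk (i : Int) 0 = 1 ∧
            (i = 0 ∨ PySem.List.pyGetD clk ((i : Int) - 1) 0 = 0)) :=
          fun h => he (hedge.mpr h)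
        simp only [if_neg he, if_neg he']
        rw [show PySem.List.pyGetD vin (i : Int) 0 = pvPrev vin (i+1) from (pvPrev_succ vin i).symm,
            show PySem.List.pyGetD din (i : Int) 0 = pvPrev din (i+1) from (pvPrev_succ din i).symm,
            show PySem.List.pyGetD clk (i : Int) 0 = pvPrev clk (i+1) from (pvPrev_succ clk i).symm,
            ih (i+1)]
        simp

theorem pvFill_eq_run (clk rst vin din : List Int) :
    ∀ (fuel i pos : Nat) (vc dc : Int) (vout dout : List Int), pos ≤ i →
      pvEmit (i + fuel) ((pvEvents clk rst vin din fuel i).foldl pvFill ((pos, vc, dc), (vout, dout))) =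
      (vout ++ List.replicate (i - pos) vc ++
         (pvRun clk rst vin din fuel i (vc, dc)).map Prod.fst,
       dout ++ List.replicate (i - pos) dc ++
         (pvRun clk rst vin din fuel i (vc, dc)).map Prod.snd) := by
  intro fuel
  induction fuel with
  | zero =>
    intro i pos vc dc vout dout hpi
    simp [pvEvents, pvRun, pvEmit]
  | succ f ih =>
    intro i pos vc dc vout dout hpi
    simp only [pvEvents, pvRun]
    have hvP : (if 0 < i then PySem.List.pyGetD vin ((i : Int) - 1) 0 else 0) = pvPrev vin i := by
      unfold pvPrev; by_cases h0 : i = 0 <;> simp [h0, Nat.pos_of_ne_zero]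
    have hdP : (if 0 < i then PySem.List.pyGetD din ((i : Int) - 1) 0 else 0) = pvPrev din i := by
      unfold pvPrev; by_cases h0 : i = 0 <;> simp [h0, Nat.pos_of_ne_zero]
    have hn : i + (f + 1) = (i + 1) + f := by omega
    by_cases hr : PySem.List.pyGetD rst (i : Int) 0 = 0
    · simp only [if_pos hr, List.foldl_cons]
      have hstep : pvFill ((pos, vc, dc), (vout, dout)) (i, 0, 0) =
          ((i, (0:Int), (0:Int)),
           (vout ++ List.replicate (i - pos) vc, dout ++ List.replicate (i - pos) dc)) := rfl
      rw [hstep, hn, ih (i+1) i 0 0 _ _ (by omega)]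
      simp [List.append_assoc, List.replicate_succ]
    · simp only [if_neg hr]
      by_cases he : PySem.List.pyGetD clk (i : Int) 0 = 1 ∧
          (i = 0 ∨ PySem.List.pyGetD clk ((i : Int) - 1) 0 = 0)
      · simp only [if_pos he, List.foldl_cons, hvP, hdP]
        have hstep : pvFill ((pos, vc, dc), (vout, dout))
              (i, pvPrev vin i,
               if pvPrev vin i ≠ 0 then (if pvPrev din i < 128 then pvPrev din i * 2 else 255) else 0) =
            ((i, pvPrev vin i,
               if pvPrev vin i ≠ 0 then (if pvPrev din i < 128 then pvPrev din i * 2 else 255) else 0),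
             (vout ++ List.replicate (i - pos) vc, dout ++ List.replicate (i - pos) dc)) := rfl
        rw [hstep, hn, ih (i+1) i _ _ _ _ (by omega)]
        simp [List.append_assoc, List.replicate_succ]
      · simp only [if_neg he]
        rw [hn, ih (i+1) pos vc dc _ _ (by omega)]
        have hrepV : List.replicate (i + 1 - pos) vc = List.replicate (i - pos) vc ++ [vc] := by
          rw [show i + 1 - pos = (i - pos) + 1 from by omega, List.replicate_succ']
        have hrepD : List.replicate (i + 1 - pos) dc = List.replicate (i - pos) dc ++ [dc] := by
          rw [show i + 1 - pos = (i - pos) + 1 from by omega, List.replicate_succ']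
        simp [hrepV, hrepD, List.append_assoc]

-- ===== VERDICT (by name: the statement is the Claim_ definition above) =====
theorem reference_multiplier_spec : Claim_equal_reference_multiplier := by
  intro clk rst vin din _ _
  unfold Spec_reference_multiplier reference_multiplier reference_multiplier_alt
  dsimp only
  have hA := pvALoop_eq_run clk rst vin din clk.length 0 0 0 [] []
  have h0v : pvPrev vin 0 = 0 := by simp [pvPrev]
  have h0d : pvPrev din 0 = 0 := by simp [pvPrev]
  have h0c : pvPrev clk 0 = 0 := by simp [pvPrev]
  rw [h0v, h0d, h0c] at hA
  rw [hA]
  have hB := pvFill_eq_run clk rst vin din clk.length 0 0 0 0 [] [] (le_refl 0)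
  simp only [Nat.zero_add] at hB
  rw [hB]
  simp
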